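-- pv_equiv track=rewrite | github.com/dyd1833842773/SPMA | subgraph.py | create_entity_relation_mappings
-- ===== SOURCE A (Python) =====
-- def create_entity_relation_mappings(triples):
--     """Create new entity2id and relation2id mappings."""
--     sampled_entities = set()
--     sampled_relations = set()
--
--     for head, relation, tail in triples:
--         sampled_entities.update([head, tail])
--         sampled_relations.add(relation)
--
--     new_entity2id = {entity: idx for idx, entity in enumerate(sorted(sampled_entities))}
--     new_relation2id = {relation: idx for idx, relation in enumerate(sorted(sampled_relations))}
--
--     return new_entity2id, new_relation2id
-- ===== SOURCE B (Python) =====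
-- def _numbered_unique(values):
--     """Sort with duplicates, then number distinct values in one scan."""
--     mapping = {}
--     prev = None
--     for v in sorted(values):
--         if prev is None or v != prev:
--             mapping[v] = len(mapping)
--             prev = v
--     return mapping
--
--
-- def create_entity_relation_mappings(triples):
--     """Create new entity2id and relation2id mappings (sort-then-dedup-scan version)."""
--     entity_pool = [e for hrt in triples for e in (hrt[0], hrt[2])]
--     relation_pool = [hrt[1] for hrt in triples]
--     return _numbered_unique(entity_pool), _numbered_unique(relation_pool)
-- ===== Notes on version B (the rewrite author's own statement) =====
-- stated objective: alternative
-- what changed: B builds no sets at all: it sorts the raw duplicate-carrying entity/relation pools and assigns ids in one linear scan that skips values equal to the previously kept one, instead of A's per-triple set accumulation followed by enumerate(sorted(set)).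
import Mathlib
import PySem

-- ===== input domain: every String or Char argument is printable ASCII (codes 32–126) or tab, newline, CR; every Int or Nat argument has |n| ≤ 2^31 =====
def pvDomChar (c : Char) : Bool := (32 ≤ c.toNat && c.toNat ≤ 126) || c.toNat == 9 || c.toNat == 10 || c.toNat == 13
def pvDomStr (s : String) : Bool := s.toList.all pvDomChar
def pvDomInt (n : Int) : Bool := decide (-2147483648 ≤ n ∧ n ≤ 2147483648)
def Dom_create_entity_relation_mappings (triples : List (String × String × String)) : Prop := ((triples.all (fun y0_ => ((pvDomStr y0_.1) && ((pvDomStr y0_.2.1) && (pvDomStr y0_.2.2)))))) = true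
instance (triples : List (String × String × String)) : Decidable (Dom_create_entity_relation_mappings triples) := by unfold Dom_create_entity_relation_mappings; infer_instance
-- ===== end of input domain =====

-- B replaces A's set-building + sorted-enumerate with a sort of the raw (duplicate-carrying)
-- pools followed by ONE dedup-and-number scan tracking the previous value (no sets at all);
-- objective: alternative decomposition, same asymptotic cost.


-- ===== PORT A =====
-- the dict comprehensions build dicts whose keys (elements of a sorted set) are distinct,
-- so under the association-list convention they are exactly the (key, idx) pair lists
def create_entity_relation_mappings (triples : List (String × String × String)) : (List (String × Int)) × (List (String × Int)) :=
  let st := triples.foldl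
    (fun (acc : PySem.Set String × PySem.Set String) t =>
      (PySem.Set.update acc.1 [t.1, t.2.2], PySem.Set.add acc.2 t.2.1))
    (PySem.Set.empty, PySem.Set.empty)
  let new_entity2id :=
    (PySem.List.enumerate (PySem.List.sorted st.1 (fun x => x)) 0).map (fun p => (p.2, p.1))
  let new_relation2id :=
    (PySem.List.enumerate (PySem.List.sorted st.2 (fun x => x)) 0).map (fun p => (p.2, p.1))
  (new_entity2id, new_relation2id)

-- ===== PORT B =====
-- helper _numbered_unique: sort (duplicates kept), then number unseen values in one scan
-- ('prev is None or v != prev' is the Option match; mapping[v] = len(mapping) is insert at size)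
def pvStep (st : PySem.Dict String Int × Option String) (v : String) :
    PySem.Dict String Int × Option String :=
  match st.2 with
  | none => (st.1.insert v (st.1.size : Int), some v)
  | some prev => if v ≠ prev then (st.1.insert v (st.1.size : Int), some v) else st

def numbered_unique (values : List String) : PySem.Dict String Int :=
  ((PySem.List.sorted values (fun x => x)).foldl pvStep (PySem.Dict.empty, none)).1

def create_entity_relation_mappings_alt (triples : List (String × String × String)) : (List (String × Int)) × (List (String × Int)) :=
  let entity_pool := triples.flatMap (fun hrt => [hrt.1, hrt.2.2])
  let relation_pool := triples.map (fun hrt => hrt.2.1)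
  ((numbered_unique entity_pool).items, (numbered_unique relation_pool).items)

-- ===== PRECONDITION & SPEC =====
def Spec_create_entity_relation_mappings (triples : List (String × String × String)) (out : (List (String × Int)) × (List (String × Int))) : Prop := out = create_entity_relation_mappings_alt triples
instance (triples : List (String × String × String)) (out : (List (String × Int)) × (List (String × Int))) : Decidable (Spec_create_entity_relation_mappings triples out) := by unfold Spec_create_entity_relation_mappings; infer_instance

-- ===== CLAIM (what is proved, stated in full; the proofs are below) =====
def Claim_equal_create_entity_relation_mappings : Prop := ∀ (triples : List (String × String × String)), Dom_create_entity_relation_mappings triples → Spec_create_entity_relation_mappings triples (create_entity_relation_mappings triples)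

-- ===== LEMMAS AND PROOFS =====

-- the subsequence B's scan keeps: drop values equal to the previously kept one
def pvKeep : Option String → List String → List String
  | _, [] => []
  | none, v :: r => v :: pvKeep (some v) r
  | some p, v :: r => if v ≠ p then v :: pvKeep (some v) r else pvKeep (some p) r

-- number a list consecutively from n
def pvNum (n : Int) : List String → List (String × Int)
  | [] => []
  | x :: r => (x, n) :: pvNum (n + 1) r

theorem pvKeep_some_facts (vs : List String) (hs : vs.Pairwise (· ≤ ·)) :
    ∀ p : String, (∀ x ∈ vs, p ≤ x) →
      (∀ y ∈ pvKeep (some p) vs, p < y) ∧ (pvKeep (some p) vs).Pairwise (· < ·) ∧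
        (∀ y, y ∈ pvKeep (some p) vs ↔ y ∈ vs ∧ y ≠ p) := by
  induction vs with
  | nil => intro p _; simp [pvKeep]
  | cons v r ih =>
    intro p hp
    rcases List.pairwise_cons.mp hs with ⟨hv, hr⟩
    have hpv : p ≤ v := hp v (by simp)
    by_cases hvp : v = p
    · subst hvp
      have hK := ih hr v (fun x hx => hv x hx)
      have hred : pvKeep (some v) (v :: r) = pvKeep (some v) r := by simp [pvKeep]
      rw [hred]
      refine ⟨hK.1, hK.2.1, fun y => ?_⟩
      rw [hK.2.2 y]
      constructor
      · rintro ⟨hy, hyn⟩; exact ⟨List.mem_cons_of_mem _ hy, hyn⟩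
      · rintro ⟨hy, hyn⟩
        rcases List.mem_cons.mp hy with h | h
        · exact absurd h hyn
        · exact ⟨h, hyn⟩
    · have hlt : p < v := lt_of_le_of_ne hpv (Ne.symm hvp)
      have hK := ih hr v hv
      simp only [pvKeep, ne_eq, if_pos hvp]
      refine ⟨?_, ?_, ?_⟩
      · intro y hy
        rcases List.mem_cons.mp hy with rfl | hy
        · exact hlt
        · exact lt_trans hlt (hK.1 y hy)
      · exact List.pairwise_cons.mpr ⟨hK.1, hK.2.1⟩
      · intro y
        rw [List.mem_cons, hK.2.2 y]
        constructor
        · rintro (rfl | ⟨hy, hyn⟩)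
          · exact ⟨by simp, fun h => hvp h⟩
          · exact ⟨List.mem_cons_of_mem _ hy,
              ne_of_gt (lt_of_lt_of_le hlt (hv y hy))⟩
        · rintro ⟨hy, hyn⟩
          rcases List.mem_cons.mp hy with rfl | hy
          · exact Or.inl rfl
          · by_cases hyv : y = v
            · exact Or.inl hyv
            · exact Or.inr ⟨hy, hyv⟩

theorem pvKeep_none_facts (vs : List String) (hs : vs.Pairwise (· ≤ ·)) :
    (pvKeep none vs).Pairwise (· < ·) ∧ (∀ y, y ∈ pvKeep none vs ↔ y ∈ vs) := by
  cases vs with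
  | nil => simp [pvKeep]
  | cons v r =>
    rcases List.pairwise_cons.mp hs with ⟨hv, hr⟩
    have hK := pvKeep_some_facts r hr v hv
    simp only [pvKeep]
    refine ⟨List.pairwise_cons.mpr ⟨hK.1, hK.2.1⟩, fun y => ?_⟩
    rw [List.mem_cons, List.mem_cons, hK.2.2 y]
    constructor
    · rintro (rfl | ⟨hy, _⟩)
      · exact Or.inl rfl
      · exact Or.inr hy
    · rintro (rfl | hy)
      · exact Or.inl rfl
      · by_cases hyv : y = v
        · exact Or.inl hyv
        · exact Or.inr ⟨hy, hyv⟩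

theorem fold_items (vs : List String) (d : PySem.Dict String Int) (p : String)
    (hs : vs.Pairwise (· ≤ ·)) (hp : ∀ x ∈ vs, p ≤ x) (hk : ∀ k ∈ d.keys, k ≤ p) :
    (vs.foldl pvStep (d, some p)).1.items = d.items ++ pvNum (d.size : Int) (pvKeep (some p) vs) := by
  induction vs generalizing d p with
  | nil => simp [pvKeep, pvNum]
  | cons v r ih =>
    rcases List.pairwise_cons.mp hs with ⟨hv, hr⟩
    have hpv : p ≤ v := hp v (by simp)
    rw [List.foldl_cons]
    by_cases hvp : v = p
    · subst hvp
      have hstep : pvStep (d, some v) v = (d, some v) := by simp [pvStep]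
      rw [hstep, ih d v hr (fun x hx => hv x hx) hk]
      simp [pvKeep]
    · have hlt : p < v := lt_of_le_of_ne hpv (Ne.symm hvp)
      have hnm : v ∉ d.keys := fun h => absurd (hk v h) (not_le.mpr hlt)
      have hnc : d.contains v = false := by
        rw [← Bool.not_eq_true, PySem.Dict.contains_iff_mem_keys]; exact hnm
      have hstep : pvStep (d, some p) v = (d.insert v (d.size : Int), some v) := by
        simp [pvStep, hvp]
      have hitems : ∀ z : Int, (d.insert v z).items = d.items ++ [(v, z)] := fun z => by
        rw [PySem.Dict.items_insert]; simp [hnc]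
      have hkeys : ∀ z : Int, (d.insert v z).keys = d.keys ++ [v] := fun z => by
        simp [PySem.Dict.keys, hitems z]
      rw [hstep, ih (d.insert v (d.size : Int)) v hr hv ?keys]
      case keys =>
        intro k hkmem
        rw [hkeys _] at hkmem
        rcases List.mem_append.mp hkmem with h | h
        · exact le_of_lt (lt_of_le_of_lt (hk k h) hlt)
        · simp only [List.mem_cons, List.not_mem_nil, or_false] at h
          exact le_of_eq h
      have hsize : ((d.insert v (d.size : Int)).size : Int) = (d.size : Int) + 1 := by
        simp only [PySem.Dict.size, hitems, List.length_append, List.length_cons,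
          List.length_nil]
        push_cast
        omega
      rw [hsize, hitems _]
      simp only [pvKeep, ne_eq, if_pos hvp, pvNum, List.append_assoc, List.cons_append,
        List.nil_append]

theorem numbered_unique_eq (values : List String) :
    (numbered_unique values).items =
      pvNum 0 (pvKeep none (PySem.List.sorted values (fun x => x))) := by
  unfold numbered_unique
  have hs : (PySem.List.sorted values (fun x => x)).Pairwise (· ≤ ·) :=
    PySem.List.sorted_pairwise values (fun x => x)
  generalize hL : PySem.List.sorted values (fun x => x) = L at hs ⊢
  cases L with
  | nil => rfl
  | cons v r =>
    rcases List.pairwise_cons.mp hs with ⟨hv, hr⟩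
    rw [List.foldl_cons]
    have hstep : pvStep ((PySem.Dict.empty : PySem.Dict String Int), none) v =
        (PySem.Dict.empty.insert v (0 : Int), some v) := rfl
    have h1 : ((PySem.Dict.empty : PySem.Dict String Int).insert v (0 : Int)).items =
        [(v, 0)] := by
      rw [PySem.Dict.items_insert]
      simp [PySem.Dict.empty, PySem.Dict.contains]
    have hkeys : ((PySem.Dict.empty : PySem.Dict String Int).insert v (0 : Int)).keys =
        [v] := by
      simp [PySem.Dict.keys, h1]
    have hs1 : (((PySem.Dict.empty : PySem.Dict String Int).insert v (0 : Int)).size : Int) =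
        1 := by
      simp [PySem.Dict.size, h1]
    rw [hstep, fold_items r _ v hr hv ?keys]
    case keys =>
      intro k hkmem
      rw [hkeys] at hkmem
      simp only [List.mem_cons, List.not_mem_nil, or_false] at hkmem
      exact le_of_eq hkmem
    rw [h1, hs1]
    simp [pvKeep, pvNum]

-- B's kept scan of the sorted pool is exactly A's sorted set of the pool
theorem keep_sorted_eq_sorted_set (xs : List String) :
    PySem.List.sorted (PySem.Set.ofList xs) (fun x => x) =
      pvKeep none (PySem.List.sorted xs (fun x => x)) := by
  have hs : (PySem.List.sorted xs (fun x => x)).Pairwise (· ≤ ·) :=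
    PySem.List.sorted_pairwise xs (fun x => x)
  obtain ⟨hlt, hmem⟩ := pvKeep_none_facts _ hs
  apply PySem.List.sorted_eq_of_perm_of_pairwise_lt
  · rw [List.perm_ext_iff_of_nodup (hlt.imp fun h => ne_of_lt h) (PySem.Set.nodup_ofList _)]
    intro y
    rw [hmem y, PySem.List.mem_sorted, PySem.Set.mem_ofList]
  · exact hlt

theorem enumerate_map_swap (xs : List String) (n : Int) :
    (PySem.List.enumerate xs n).map (fun p => (p.2, p.1)) = pvNum n xs := by
  induction xs generalizing n with
  | nil => simp [pvNum]
  | cons x r ih => simp [PySem.List.enumerate_cons, pvNum, ih]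

-- A's entity accumulator: membership of the fold of two-element updates
theorem mem_foldl_update_pair (triples : List (String × String × String))
    (s : PySem.Set String) (hs : s.Nodup) (y : String) :
    y ∈ triples.foldl (fun (s : PySem.Set String) t => PySem.Set.update s [t.1, t.2.2]) s ↔
      y ∈ s ∨ ∃ t ∈ triples, y = t.1 ∨ y = t.2.2 := by
  induction triples generalizing s with
  | nil => simp
  | cons t ts ih =>
    simp only [List.foldl_cons, ih _ (PySem.Set.nodup_update _ _ hs), PySem.Set.mem_update,
      List.mem_cons, List.not_mem_nil, or_false]
    aesop

theorem nodup_foldl_update_pair (triples : List (String × String × String))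
    (s : PySem.Set String) (hs : s.Nodup) :
    (triples.foldl (fun (s : PySem.Set String) t => PySem.Set.update s [t.1, t.2.2]) s).Nodup := by
  induction triples generalizing s with
  | nil => exact hs
  | cons t ts ih => exact ih _ (PySem.Set.nodup_update _ _ hs)

-- A's entity set is a permutation of set(entity_pool)
theorem entity_set_perm (triples : List (String × String × String)) :
    (triples.foldl (fun (s : PySem.Set String) t => PySem.Set.update s [t.1, t.2.2])
        PySem.Set.empty).Perm
      (PySem.Set.ofList (triples.flatMap (fun hrt => [hrt.1, hrt.2.2]))) := by
  rw [List.perm_ext_iff_of_nodup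
    (nodup_foldl_update_pair triples PySem.Set.empty List.nodup_nil)
    (PySem.Set.nodup_ofList _)]
  intro y
  rw [mem_foldl_update_pair triples PySem.Set.empty List.nodup_nil y]
  simp only [PySem.Set.mem_ofList, List.mem_flatMap, List.mem_cons, List.not_mem_nil, or_false]
  aesop

-- A's relation accumulator is set(relation_pool)
theorem relation_fold_eq (triples : List (String × String × String)) :
    triples.foldl (fun (s : PySem.Set String) t => PySem.Set.add s t.2.1) PySem.Set.empty =
      PySem.Set.ofList (triples.map (fun t => t.2.1)) := by
  rw [← PySem.Set.update_map_eq_foldl_add, PySem.Set.update_empty]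

-- ===== VERDICT (by name: the statement is the Claim_ definition above) =====
theorem create_entity_relation_mappings_spec : Claim_equal_create_entity_relation_mappings := by
  intro triples _
  unfold Spec_create_entity_relation_mappings create_entity_relation_mappings
    create_entity_relation_mappings_alt
  rw [PySem.List.foldl_prod_mk
    (fun (s : PySem.Set String) t => PySem.Set.update s [t.1, t.2.2])
    (fun (s : PySem.Set String) t => PySem.Set.add s t.2.1) triples
    PySem.Set.empty PySem.Set.empty]
  have he : PySem.List.sorted
      (triples.foldl (fun (s : PySem.Set String) t => PySem.Set.update s [t.1, t.2.2])
        PySem.Set.empty) (fun x => x) =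
      PySem.List.sorted (PySem.Set.ofList (triples.flatMap (fun hrt => [hrt.1, hrt.2.2])))
        (fun x => x) :=
    PySem.List.sorted_eq_sorted_of_perm _ _ _ (fun a b hab => hab) (entity_set_perm triples)
  simp only [he, relation_fold_eq, enumerate_map_swap, keep_sorted_eq_sorted_set,
    numbered_unique_eq]
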